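-- pv_equiv track=rewrite | github.com/xiaoqzhwhu/DrICL | bin/utils.py | find_consecutive_greater_than_zero
-- ===== SOURCE A (Python) =====
-- def find_consecutive_greater_than_zero(tensor):
--     start = None
--     end = None
--     consecutive_segments = []
--     for i in range(len(tensor)):
--         if tensor[i] > 0:
--             if start is None:
--                 start = i
--             end = i
--         else:
--             if start is not None:
--                 consecutive_segments.append((start, end))
--                 start = None
--     if start is not None:
--         consecutive_segments.append((start, end))
--     return consecutive_segments
-- ===== SOURCE B (Python) =====
-- def find_consecutive_greater_than_zero(tensor):
--     segments = []
--     n = len(tensor)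
--     i = 0
--     while i < n:
--         if tensor[i] > 0:
--             j = i
--             while j + 1 < n and tensor[j + 1] > 0:
--                 j += 1
--             segments.append((i, j))
--             i = j + 1
--         else:
--             i += 1
--     return segments
-- ===== Notes on version B (the rewrite author's own statement) =====
-- stated objective: alternative
-- what changed: Replaces A's per-element start/end/None state machine with trailing flush by a run-jumping two-pointer scan: at each positive element an inner loop finds the run's last index, one tuple is emitted, and the scan resumes after the run.
import Mathlib
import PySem

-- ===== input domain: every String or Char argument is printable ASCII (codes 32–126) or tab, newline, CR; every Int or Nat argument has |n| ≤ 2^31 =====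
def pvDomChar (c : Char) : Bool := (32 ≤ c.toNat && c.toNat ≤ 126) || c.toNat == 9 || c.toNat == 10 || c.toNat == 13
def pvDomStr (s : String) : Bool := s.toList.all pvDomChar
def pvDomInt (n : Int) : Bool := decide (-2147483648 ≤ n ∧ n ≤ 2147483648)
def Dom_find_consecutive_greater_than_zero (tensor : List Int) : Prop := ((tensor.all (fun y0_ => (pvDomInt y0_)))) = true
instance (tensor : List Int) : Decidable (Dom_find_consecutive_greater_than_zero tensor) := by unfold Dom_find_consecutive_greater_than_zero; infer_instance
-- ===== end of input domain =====

-- B replaces A's per-element start/end/None state machine (with trailing flush) by a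
-- run-jumping two-pointer scan that emits each (first,last) pair directly; alternative, same cost.


-- ===== PORT A =====
-- state = (start, end, consecutive_segments); tensor[i] with 0 ≤ i < len is List.getD.
-- In A, whenever start is `some`, end is `some` too; `.getD 0` only discharges the Option at
-- the (always-reached-with-some) append sites.
def pvStepA (tensor : List Int) (st : Option Int × Option Int × List (Int × Int)) (i : Nat) :
    Option Int × Option Int × List (Int × Int) :=
  let (start, end_, segs) := st
  if tensor.getD i 0 > 0 then
    (match start with | none => some (i : Int) | some s => some s, some (i : Int), segs)
  else
    match start with
    | some s => (none, end_, segs ++ [(s, end_.getD 0)])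
    | none => (none, end_, segs)

def find_consecutive_greater_than_zero (tensor : List Int) : List (Int × Int) :=
  let r := (List.range tensor.length).foldl (pvStepA tensor) (none, none, [])
  match r.1 with
  | some s => r.2.2 ++ [(s, r.2.1.getD 0)]
  | none => r.2.2

-- ===== PORT B =====
-- inner while loop: advance j while the next element is also positive
def pvRunEnd (tensor : List Int) (j : Nat) : Nat :=
  if j + 1 < tensor.length ∧ tensor.getD (j + 1) 0 > 0 then pvRunEnd tensor (j + 1) else j
termination_by tensor.length - j

theorem pvRunEnd_ge (tensor : List Int) (j : Nat) : j ≤ pvRunEnd tensor j := by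
  fun_induction pvRunEnd with
  | case1 j h ih => omega
  | case2 j h => omega

theorem pvRunEnd_lt (tensor : List Int) (j : Nat) (h : j < tensor.length) :
    pvRunEnd tensor j < tensor.length := by
  fun_induction pvRunEnd with
  | case1 j h' ih => exact ih h'.1
  | case2 j h' => exact h

-- outer while loop over index i
def pvScanB (tensor : List Int) (i : Nat) : List (Int × Int) :=
  if h : i < tensor.length then
    if tensor.getD i 0 > 0 then
      ((i : Int), (pvRunEnd tensor i : Int)) :: pvScanB tensor (pvRunEnd tensor i + 1)
    else pvScanB tensor (i + 1)
  else []
termination_by tensor.length - i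
decreasing_by
  · have := pvRunEnd_ge tensor i
    have := pvRunEnd_lt tensor i h
    omega
  · omega

def find_consecutive_greater_than_zero_alt (tensor : List Int) : List (Int × Int) :=
  pvScanB tensor 0

-- ===== PRECONDITION & SPEC =====
def Spec_find_consecutive_greater_than_zero (tensor : List Int) (out : List (Int × Int)) : Prop := out = find_consecutive_greater_than_zero_alt tensor
instance (tensor : List Int) (out : List (Int × Int)) : Decidable (Spec_find_consecutive_greater_than_zero tensor out) := by unfold Spec_find_consecutive_greater_than_zero; infer_instance

-- ===== CLAIM (what is proved, stated in full; the proofs are below) =====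
def Claim_equal_find_consecutive_greater_than_zero : Prop := ∀ (tensor : List Int), Dom_find_consecutive_greater_than_zero tensor → Spec_find_consecutive_greater_than_zero tensor (find_consecutive_greater_than_zero tensor)

-- ===== LEMMAS AND PROOFS =====

-- finalize A's loop state
def pvFinA (r : Option Int × Option Int × List (Int × Int)) : List (Int × Int) :=
  match r.1 with
  | some s => r.2.2 ++ [(s, r.2.1.getD 0)]
  | none => r.2.2

-- The key invariant, proved for both loop states simultaneously, by induction on the
-- remaining length k of the index range.
theorem pvLoop_inv (tensor : List Int) (k : Nat) :
    ∀ i, i + k = tensor.length →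
      (∀ (e : Option Int) (segs : List (Int × Int)),
        pvFinA ((List.range' i k).foldl (pvStepA tensor) (none, e, segs)) =
          segs ++ pvScanB tensor i) ∧
      (∀ (s e : Int) (segs : List (Int × Int)),
        pvFinA ((List.range' i k).foldl (pvStepA tensor) (some s, some e, segs)) =
          if i < tensor.length ∧ tensor.getD i 0 > 0 then
            segs ++ ((s, (pvRunEnd tensor i : Int)) :: pvScanB tensor (pvRunEnd tensor i + 1))
          else segs ++ ((s, e) :: pvScanB tensor i)) := by
  induction k with
  | zero =>
    intro i hi
    constructor
    · intro e segs
      rw [List.range'_zero]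
      simp only [List.foldl_nil]
      rw [pvScanB, dif_neg (by omega : ¬ i < tensor.length)]
      simp [pvFinA]
    · intro s e segs
      rw [List.range'_zero]
      simp only [List.foldl_nil]
      rw [if_neg (fun h => absurd h.1 (by omega)), pvScanB,
        dif_neg (by omega : ¬ i < tensor.length)]
      simp [pvFinA]
  | succ k ih =>
    intro i hi
    have hi' : i < tensor.length := by omega
    have hrange : List.range' i (k + 1) = i :: List.range' (i + 1) k := by
      simp [List.range'_succ]
    have hrun : pvRunEnd tensor i =
        if i + 1 < tensor.length ∧ tensor.getD (i + 1) 0 > 0 then pvRunEnd tensor (i + 1)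
        else i := by
      rw [pvRunEnd]
    constructor
    · intro e segs
      rw [hrange]
      simp only [List.foldl_cons]
      by_cases hpos : tensor.getD i 0 > 0
      · have hstep : pvStepA tensor (none, e, segs) i = (some (i : Int), some (i : Int), segs) := by
          simp only [pvStepA]; rw [if_pos hpos]
        rw [hstep, (ih (i + 1) (by omega)).2]
        conv_rhs => rw [pvScanB]
        rw [dif_pos hi', if_pos hpos]
        by_cases hnext : i + 1 < tensor.length ∧ tensor.getD (i + 1) 0 > 0
        · rw [if_pos hnext, hrun, if_pos hnext]
        · rw [if_neg hnext, hrun, if_neg hnext]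
      · have hstep : pvStepA tensor (none, e, segs) i = (none, e, segs) := by
          simp only [pvStepA]; rw [if_neg hpos]
        rw [hstep, ((ih (i + 1) (by omega)).1 e segs)]
        conv_rhs => rw [pvScanB]
        rw [dif_pos hi', if_neg hpos]
    · intro s e segs
      rw [hrange]
      simp only [List.foldl_cons]
      by_cases hpos : tensor.getD i 0 > 0
      · have hstep : pvStepA tensor (some s, some e, segs) i = (some s, some (i : Int), segs) := by
          simp only [pvStepA]; rw [if_pos hpos]
        rw [hstep, (ih (i + 1) (by omega)).2, if_pos (And.intro hi' hpos)]
        by_cases hnext : i + 1 < tensor.length ∧ tensor.getD (i + 1) 0 > 0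
        · rw [if_pos hnext, hrun, if_pos hnext]
        · rw [if_neg hnext, hrun, if_neg hnext]
      · have hstep : pvStepA tensor (some s, some e, segs) i =
            (none, some e, segs ++ [(s, e)]) := by
          simp only [pvStepA]; rw [if_neg hpos]; rfl
        rw [hstep, ((ih (i + 1) (by omega)).1 (some e) (segs ++ [(s, e)])),
          if_neg (fun h => hpos h.2)]
        conv_rhs => rw [pvScanB]
        rw [dif_pos hi', if_neg hpos]
        simp

-- ===== VERDICT (by name: the statement is the Claim_ definition above) =====
theorem find_consecutive_greater_than_zero_spec : Claim_equal_find_consecutive_greater_than_zero := by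
  intro tensor _
  unfold Spec_find_consecutive_greater_than_zero find_consecutive_greater_than_zero
    find_consecutive_greater_than_zero_alt
  have h := ((pvLoop_inv tensor tensor.length 0 (by omega)).1 none [])
  simpa [pvFinA, List.range_eq_range'] using h
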